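-- pv_equiv track=rewrite | github.com/Gaspi/my-project-euler | solved/euler98.py | compute_perm
-- ===== SOURCE A (Python) =====
-- def compute_perm(str1, str2):
--     perm = {}
--     revperm = {}
--     for k,v in zip(str1,str2):
--         if k in perm and perm[k] != v:
--             return None
--         if v in revperm and revperm[v] != k:
--             return None
--         perm[k]=v
--         revperm[v]=k
--     return perm
-- ===== SOURCE B (Python) =====
-- def compute_perm(str1, str2):
--     # Materialize the mapping first, then validate in two separate passes.
--     pairs = list(zip(str1, str2))
--     perm = dict(pairs)
--     if not all(perm[k] == v for k, v in pairs):
--         return None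
--     if len(set(perm.values())) != len(perm):
--         return None
--     return perm
-- ===== Notes on version B (the rewrite author's own statement) =====
-- stated objective: alternative
-- what changed: Replaces the single-pass maintenance of a forward dict plus a reverse dict with early returns by a materialize-then-validate decomposition: build perm = dict(zip(str1, str2)) once, then check forward consistency in one pass and injectivity by comparing len(set(perm.values())) with len(perm).
import Mathlib
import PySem

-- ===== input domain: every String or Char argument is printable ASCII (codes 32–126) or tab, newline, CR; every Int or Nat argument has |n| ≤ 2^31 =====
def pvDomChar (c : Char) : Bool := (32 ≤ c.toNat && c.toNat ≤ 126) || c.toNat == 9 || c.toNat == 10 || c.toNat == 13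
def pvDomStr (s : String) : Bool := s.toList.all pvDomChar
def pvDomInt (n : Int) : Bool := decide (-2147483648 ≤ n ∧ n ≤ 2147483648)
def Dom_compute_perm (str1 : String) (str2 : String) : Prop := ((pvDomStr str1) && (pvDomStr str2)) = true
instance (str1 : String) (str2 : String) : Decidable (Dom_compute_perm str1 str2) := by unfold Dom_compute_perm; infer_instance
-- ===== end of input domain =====

-- B replaces A's single pass over zip(str1,str2) maintaining a forward and a reverse dict with early
-- returns by a materialize-then-validate decomposition (build dict(zip), then a forward-consistency
-- pass, then a set-cardinality injectivity test); same O(n) cost, different structure.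

-- ===== PORT A =====
-- the loop 'for k,v in zip(str1,str2)' with state (perm, revperm) and early return None
def pvLoopA : List (Char × Char) → PySem.Dict Char Char → PySem.Dict Char Char →
    Option (PySem.Dict Char Char)
  | [], perm, _ => some perm
  | (k, v) :: rest, perm, revperm =>
    if perm.contains k && (perm.getD k v != v) then none
    else if revperm.contains v && (revperm.getD v k != k) then none
    else pvLoopA rest (perm.insert k v) (revperm.insert v k)

def compute_perm (str1 : String) (str2 : String) : Option (List (String × String)) :=
  (pvLoopA (str1.toList.zip str2.toList) PySem.Dict.empty PySem.Dict.empty).map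
    (fun d => d.items.map (fun p => (String.mk [p.1], String.mk [p.2])))

-- ===== PORT B =====
def compute_perm_alt (str1 : String) (str2 : String) : Option (List (String × String)) :=
  let pairs := str1.toList.zip str2.toList
  let perm : PySem.Dict Char Char :=
    pairs.foldl (fun d p => d.insert p.1 p.2) PySem.Dict.empty
  if pairs.all (fun p => perm.get? p.1 == some p.2) then
    if (PySem.Set.ofList perm.values).length == perm.size then
      some (perm.items.map (fun p => (String.mk [p.1], String.mk [p.2])))
    else none
  else none

-- ===== PRECONDITION & SPEC =====
def Spec_compute_perm (str1 : String) (str2 : String) (out : Option (List (String × String))) : Prop := out = compute_perm_alt str1 str2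
instance (str1 : String) (str2 : String) (out : Option (List (String × String))) : Decidable (Spec_compute_perm str1 str2 out) := by unfold Spec_compute_perm; infer_instance

-- ===== CLAIM (what is proved, stated in full; the proofs are below) =====
def Claim_equal_compute_perm : Prop := ∀ (str1 : String) (str2 : String), Dom_compute_perm str1 str2 → Spec_compute_perm str1 str2 (compute_perm str1 str2)

-- ===== LEMMAS AND PROOFS =====

-- F l = the dict built by inserting every pair of l in order (B's perm; also A's perm on success)
def pvF (d : PySem.Dict Char Char) (l : List (Char × Char)) : PySem.Dict Char Char :=
  l.foldl (fun d p => d.insert p.1 p.2) d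

-- the list of pairs is the graph of a partial bijection
def pvGood (l : List (Char × Char)) : Prop :=
  ∀ p ∈ l, ∀ q ∈ l, (p.1 = q.1 → p.2 = q.2) ∧ (p.2 = q.2 → p.1 = q.1)

-- the checks A's loop performs from state perm onwards, as a predicate
def pvOkFrom (perm : PySem.Dict Char Char) : List (Char × Char) → Prop
  | [] => True
  | p :: rest => (∀ w, perm.get? p.1 = some w → w = p.2) ∧
      (∀ k, perm.get? k = some p.2 → k = p.1) ∧
      pvOkFrom (perm.insert p.1 p.2) rest

-- revperm is the exact inverse of perm
def pvInv (perm rev : PySem.Dict Char Char) : Prop :=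
  ∀ k v, perm.get? k = some v ↔ rev.get? v = some k

theorem pvGood_sublist {l l' : List (Char × Char)} (h : l.Sublist l') (hg : pvGood l') : pvGood l :=
  fun p hp q hq => hg p (h.mem hp) q (h.mem hq)

theorem pvGood_append_singleton (P : List (Char × Char)) (p : Char × Char) :
    pvGood (P ++ [p]) ↔ pvGood P ∧ ∀ q ∈ P, (q.1 = p.1 → q.2 = p.2) ∧ (q.2 = p.2 → q.1 = p.1) := by
  constructor
  · intro h
    exact ⟨pvGood_sublist (List.sublist_append_left P [p]) h,
      fun q hq => h q (by simp [hq]) p (by simp)⟩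
  · rintro ⟨h1, h2⟩ q hq r hr
    simp only [List.mem_append, List.mem_singleton] at hq hr
    rcases hq with hq | rfl <;> rcases hr with hr | rfl
    · exact h1 q hq r hr
    · exact h2 q hq
    · exact ⟨fun e => ((h2 r hr).1 e.symm).symm, fun e => ((h2 r hr).2 e.symm).symm⟩
    · exact ⟨fun _ => rfl, fun _ => rfl⟩

theorem pvF_append_singleton (d : PySem.Dict Char Char) (l : List (Char × Char)) (p : Char × Char) :
    pvF d (l ++ [p]) = (pvF d l).insert p.1 p.2 := by
  simp [pvF]

theorem pvF_nodup_keys (l : List (Char × Char)) :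
    (pvF PySem.Dict.empty l).keys.Nodup :=
  PySem.Dict.nodup_keys_foldl_insert_key l Prod.fst (fun d a => a.2) PySem.Dict.empty
    (by simp [PySem.Dict.keys_empty])

theorem pvF_get?_mem_aux (l : List (Char × Char)) (d : PySem.Dict Char Char) (k v : Char) :
    (pvF d l).get? k = some v → (k, v) ∈ l ∨ d.get? k = some v := by
  induction l generalizing d with
  | nil => intro h; exact Or.inr h
  | cons p rest ih =>
    intro h
    rcases ih (d.insert p.1 p.2) h with h' | h'
    · exact Or.inl (List.mem_cons_of_mem _ h')
    · rw [PySem.Dict.get?_insert] at h'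
      split_ifs at h' with hk
      · have hv : p.2 = v := by simpa using h'
        subst hk; subst hv
        exact Or.inl (by simp)
      · exact Or.inr h'

theorem pvF_get?_mem (l : List (Char × Char)) (k v : Char) :
    (pvF PySem.Dict.empty l).get? k = some v → (k, v) ∈ l := by
  intro h
  rcases pvF_get?_mem_aux l _ k v h with h' | h'
  · exact h'
  · simp [PySem.Dict.get?_empty] at h'

theorem pvF_get?_of_mem (l : List (Char × Char)) (hg : pvGood l) (k v : Char)
    (hm : (k, v) ∈ l) : (pvF PySem.Dict.empty l).get? k = some v := by
  induction l using List.reverseRecOn with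
  | nil => simp at hm
  | append_singleton P p ih =>
    rw [pvF_append_singleton, PySem.Dict.get?_insert]
    rcases List.mem_append.mp hm with hm' | hm'
    · by_cases hk : k = p.1
      · have : v = p.2 := (hg (k, v) (by simp [hm']) p (by simp)).1 hk
        simp [hk, this]
      · simp only [hk, if_false]
        exact ih (pvGood_sublist (List.sublist_append_left P [p]) hg) hm'
    · simp only [List.mem_singleton] at hm'
      have h1 : k = p.1 := congrArg Prod.fst hm'
      have h2 : v = p.2 := congrArg Prod.snd hm'
      simp [h1, h2]

theorem pvInv_insert {perm rev : PySem.Dict Char Char} (hinv : pvInv perm rev) (k0 v0 : Char)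
    (h1 : ∀ w, perm.get? k0 = some w → w = v0)
    (h2 : ∀ k, perm.get? k = some v0 → k = k0) :
    pvInv (perm.insert k0 v0) (rev.insert v0 k0) := by
  intro k v
  rw [PySem.Dict.get?_insert, PySem.Dict.get?_insert]
  by_cases hk : k = k0
  · subst hk
    rw [if_pos rfl]
    by_cases hv : v = v0
    · subst hv; rw [if_pos rfl]; simp
    · rw [if_neg hv]
      simp only [Option.some.injEq]
      constructor
      · intro h; exact absurd h.symm hv
      · intro h; exact absurd (h1 v ((hinv _ v).mpr h)) hv
  · rw [if_neg hk]
    by_cases hv : v = v0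
    · subst hv; rw [if_pos rfl]
      simp only [Option.some.injEq]
      constructor
      · intro h; exact absurd (h2 k h) hk
      · intro h; exact absurd h.symm hk
    · rw [if_neg hv]; exact hinv k v

-- A's per-pair check is false exactly when the pvOkFrom condition holds
theorem pvCheck_false_iff (perm : PySem.Dict Char Char) (k0 v0 : Char) :
    (perm.contains k0 && (perm.getD k0 v0 != v0)) = false ↔
      (∀ w, perm.get? k0 = some w → w = v0) := by
  rw [PySem.Dict.contains_eq_isSome_get?, PySem.Dict.getD_eq_get?_getD]
  cases h : perm.get? k0 with
  | none => simp
  | some w =>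
    simp only [Option.isSome_some, Option.getD_some, Bool.true_and, bne_eq_false_iff_eq,
      Option.some.injEq]
    constructor
    · rintro rfl w' hw'; exact hw'.symm
    · intro h'; exact h' w rfl

theorem pvLoopA_some (l : List (Char × Char)) : ∀ (perm rev : PySem.Dict Char Char),
    pvInv perm rev → pvOkFrom perm l →
    pvLoopA l perm rev = some (pvF perm l) := by
  induction l with
  | nil => intro perm rev _ _; rfl
  | cons p rest ih =>
    intro perm rev hinv hok
    obtain ⟨h1, h2, hrest⟩ := hok
    have h2' : ∀ w, rev.get? p.2 = some w → w = p.1 := fun w hw => h2 w ((hinv w p.2).mpr hw)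
    rw [pvLoopA, (pvCheck_false_iff perm p.1 p.2).mpr h1, (pvCheck_false_iff rev p.2 p.1).mpr h2']
    exact ih (perm.insert p.1 p.2) (rev.insert p.2 p.1) (pvInv_insert hinv p.1 p.2 h1 h2) hrest

theorem pvLoopA_none' (l : List (Char × Char)) : ∀ (perm rev : PySem.Dict Char Char),
    pvInv perm rev → ¬ pvOkFrom perm l →
    pvLoopA l perm rev = none := by
  induction l with
  | nil => intro perm rev _ hok; exact absurd trivial hok
  | cons p rest ih =>
    intro perm rev hinv hok
    rw [pvLoopA]
    by_cases hc1 : (perm.contains p.1 && (perm.getD p.1 p.2 != p.2)) = true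
    · rw [if_pos hc1]
    · rw [if_neg hc1]
      have h1 := (pvCheck_false_iff perm p.1 p.2).mp (by simpa using hc1)
      by_cases hc2 : (rev.contains p.2 && (rev.getD p.2 p.1 != p.1)) = true
      · rw [if_pos hc2]
      · rw [if_neg hc2]
        have h2' := (pvCheck_false_iff rev p.2 p.1).mp (by simpa using hc2)
        have h2 : ∀ k, perm.get? k = some p.2 → k = p.1 := fun k hk => h2' k ((hinv k p.2).mp hk)
        have hrest : ¬ pvOkFrom (perm.insert p.1 p.2) rest := fun hr => hok ⟨h1, h2, hr⟩
        exact ih (perm.insert p.1 p.2) (rev.insert p.2 p.1) (pvInv_insert hinv p.1 p.2 h1 h2) hrest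

theorem pvInv_empty : pvInv PySem.Dict.empty PySem.Dict.empty := by
  intro k v; simp [PySem.Dict.get?_empty]

-- pvOkFrom from a good prefix is exactly goodness of the whole list
theorem pvOkFrom_iff (l : List (Char × Char)) : ∀ (P : List (Char × Char)), pvGood P →
    (pvOkFrom (pvF PySem.Dict.empty P) l ↔ pvGood (P ++ l)) := by
  induction l with
  | nil => intro P hgP; simpa [pvOkFrom] using hgP
  | cons p rest ih =>
    intro P hgP
    rw [pvOkFrom, ← pvF_append_singleton]
    have hmem : ∀ q ∈ P, (pvF PySem.Dict.empty P).get? q.1 = some q.2 :=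
      fun q hq => pvF_get?_of_mem P hgP q.1 q.2 hq
    constructor
    · rintro ⟨h1, h2, hrest⟩
      have hgq : ∀ q ∈ P, (q.1 = p.1 → q.2 = p.2) ∧ (q.2 = p.2 → q.1 = p.1) := by
        intro q hq
        refine ⟨fun e => h1 q.2 (e ▸ hmem q hq), fun e => h2 q.1 (e ▸ hmem q hq)⟩
      have hgPp : pvGood (P ++ [p]) := (pvGood_append_singleton P p).mpr ⟨hgP, hgq⟩
      have := (ih (P ++ [p]) hgPp).mp hrest
      simpa using this
    · intro hgAll
      have hgPp : pvGood (P ++ [p]) := by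
        refine pvGood_sublist ?_ hgAll
        exact (List.Sublist.cons₂ p (List.nil_sublist rest)).append_left P
      obtain ⟨-, hgq⟩ := (pvGood_append_singleton P p).mp hgPp
      refine ⟨?_, ?_, (ih (P ++ [p]) hgPp).mpr (by simpa using hgAll)⟩
      · intro w hw
        have := pvF_get?_mem P p.1 w hw
        exact (hgq (p.1, w) this).1 rfl
      · intro k hk
        have := pvF_get?_mem P k p.2 hk
        exact (hgq (k, p.2) this).2 rfl

theorem pvGood_iff_okFrom (l : List (Char × Char)) :
    pvOkFrom PySem.Dict.empty l ↔ pvGood l := by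
  have := pvOkFrom_iff l [] (by intro p hp; simp at hp)
  simpa [pvF] using this

theorem pvLoopA_some' (l : List (Char × Char)) (hg : pvGood l) :
    pvLoopA l PySem.Dict.empty PySem.Dict.empty = some (pvF PySem.Dict.empty l) :=
  pvLoopA_some l _ _ pvInv_empty ((pvGood_iff_okFrom l).mpr hg)

theorem pvLoopA_none (l : List (Char × Char)) (hg : ¬ pvGood l) :
    pvLoopA l PySem.Dict.empty PySem.Dict.empty = none :=
  pvLoopA_none' l _ _ pvInv_empty (fun h => hg ((pvGood_iff_okFrom l).mp h))

-- a list whose Set.ofList has full length has no duplicates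
theorem pvOfList_sublist (xs : List Char) : (PySem.Set.ofList xs).Sublist xs := by
  induction xs using List.reverseRecOn with
  | nil => simp [PySem.Set.ofList]
  | append_singleton l p ih =>
    rw [PySem.Set.ofList_eq_foldl] at ih ⊢
    rw [List.foldl_append]
    simp only [List.foldl_cons, List.foldl_nil, PySem.Set.add]
    split_ifs
    · exact ih.trans (List.sublist_append_left l [p])
    · exact List.Sublist.append ih (List.Sublist.refl [p])

theorem pvLength_ofList_iff (xs : List Char) :
    (PySem.Set.ofList xs).length = xs.length ↔ xs.Nodup := by
  constructor
  · intro h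
    have := (pvOfList_sublist xs).eq_of_length h
    rw [← this]
    exact PySem.Set.nodup_ofList xs
  · intro h; rw [PySem.Set.ofList_eq_self_of_nodup xs h]

-- B's two checks pass exactly on good lists
theorem pvAltChecks_iff (l : List (Char × Char)) :
    ((l.all (fun p => (pvF PySem.Dict.empty l).get? p.1 == some p.2)) = true ∧
     ((PySem.Set.ofList (pvF PySem.Dict.empty l).values).length == (pvF PySem.Dict.empty l).size) = true)
    ↔ pvGood l := by
  have hnd := pvF_nodup_keys l
  have hitems : (pvF PySem.Dict.empty l).items.Nodup := List.Nodup.of_map _ hnd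
  have hsize : (pvF PySem.Dict.empty l).values.length = (pvF PySem.Dict.empty l).size := by
    simp [PySem.Dict.values, PySem.Dict.size]
  rw [List.all_eq_true]
  simp only [beq_iff_eq]
  rw [← hsize, pvLength_ofList_iff]
  constructor
  · rintro ⟨hall, hvals⟩
    intro p hp q hq
    have hgp := hall p hp
    have hgq := hall q hq
    constructor
    · intro e
      have : some p.2 = some q.2 := by rw [← hgp, ← hgq, e]
      exact Option.some.injEq .. ▸ this
    · intro e
      have hip : p ∈ (pvF PySem.Dict.empty l).items := by
        simpa using PySem.Dict.mem_items_of_get?_eq_some _ hgp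
      have hiq : q ∈ (pvF PySem.Dict.empty l).items := by
        simpa using PySem.Dict.mem_items_of_get?_eq_some _ hgq
      have := (List.nodup_map_iff_inj_on hitems).mp hvals p hip q hiq e
      exact congrArg Prod.fst this
  · intro hg
    refine ⟨fun p hp => pvF_get?_of_mem l hg p.1 p.2 (by simpa using hp), ?_⟩
    refine (List.nodup_map_iff_inj_on hitems).mpr ?_
    intro p hip q hiq e
    have hgp : (pvF PySem.Dict.empty l).get? p.1 = some p.2 :=
      PySem.Dict.get?_of_mem_items _ (by simpa using hip) hnd
    have hgq : (pvF PySem.Dict.empty l).get? q.1 = some q.2 :=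
      PySem.Dict.get?_of_mem_items _ (by simpa using hiq) hnd
    have hpl : p ∈ l := by
      have := pvF_get?_mem l p.1 p.2 hgp; simpa using this
    have hql : q ∈ l := by
      have := pvF_get?_mem l q.1 q.2 hgq; simpa using this
    have h1 : p.1 = q.1 := (hg p hpl q hql).2 e
    exact Prod.ext h1 e

-- ===== VERDICT (by name: the statement is the Claim_ definition above) =====
theorem compute_perm_spec : Claim_equal_compute_perm := by
  intro str1 str2 _
  unfold Spec_compute_perm compute_perm compute_perm_alt
  set l := str1.toList.zip str2.toList with hl
  by_cases hg : pvGood l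
  · rw [pvLoopA_some' l hg]
    obtain ⟨h1, h2⟩ := (pvAltChecks_iff l).mpr hg
    simp only [pvF] at h1 h2
    simp [pvF, h1, h2]
  · rw [pvLoopA_none l hg]
    have hnot := (pvAltChecks_iff l).not.mpr hg
    by_cases h1 : (l.all (fun p => ((l.foldl (fun d p => d.insert p.1 p.2) PySem.Dict.empty)).get? p.1 == some p.2)) = true
    · have h2 : ¬ ((PySem.Set.ofList ((l.foldl (fun d p => d.insert p.1 p.2) PySem.Dict.empty)).values).length == ((l.foldl (fun d p => d.insert p.1 p.2) PySem.Dict.empty)).size) = true := by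
        intro h2
        exact hnot ⟨by simpa [pvF] using h1, by simpa [pvF] using h2⟩
      simp [h1, h2]
    · simp [h1]
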